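-- pv_equiv track=rewrite | github.com/Nok1sh/algorithms_hw3 | task9_hw3.py | create_max_number
-- ===== SOURCE A (Python) =====
-- numbers = {0: 6, 1: 2, 2: 5, 3: 5, 4: 4,
--            5: 5, 6: 6, 7:3, 8: 7, 9: 6}
--
-- def create_max_number(n, k):
--     result = ""
--     for i in range(n):
--         digit = 9
--         while not(numbers[digit] <= k and (k - numbers[digit]) >= (n-i-1)*2):
--             digit -= 1
--         k -= numbers[digit]
--         result += str(digit)
--     return result
-- ===== SOURCE B (Python) =====
-- def create_max_number(n, k):
--     a = k - 2 * (n - 1)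
--     nines = min(n, (a - 2) // 4) if a >= 6 else 0
--     a -= 4 * nines
--     sevens = min(n - nines, a - 2) if a >= 3 else 0
--     ones = n - nines - sevens
--     return "9" * nines + "7" * sevens + "1" * ones
-- ===== Notes on version B (the rewrite author's own statement) =====
-- stated objective: alternative
-- what changed: B replaces A's per-position descending scan over the matchstick dict by a closed-form phase count: it computes how many 9s, 7s and 1s the budget yields and builds the string by repetition. (On infeasible inputs n>=1, k<2n, excluded by Pre_, A raises KeyError while B returns '1'*n.)
import Mathlib
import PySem

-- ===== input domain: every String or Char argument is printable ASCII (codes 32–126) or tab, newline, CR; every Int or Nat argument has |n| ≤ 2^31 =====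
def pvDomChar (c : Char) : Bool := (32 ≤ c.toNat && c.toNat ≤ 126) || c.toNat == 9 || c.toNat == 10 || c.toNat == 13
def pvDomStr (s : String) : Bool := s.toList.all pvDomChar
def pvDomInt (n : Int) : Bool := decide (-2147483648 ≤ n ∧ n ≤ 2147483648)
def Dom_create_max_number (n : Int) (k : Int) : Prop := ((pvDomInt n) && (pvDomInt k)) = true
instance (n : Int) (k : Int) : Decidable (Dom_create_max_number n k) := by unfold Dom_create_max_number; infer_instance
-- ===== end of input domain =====

-- B computes the digit string in closed form (counts of 9s, 7s, 1s) instead of A's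
-- per-position descending scan; same value wherever A returns.

-- ===== PORT A =====
-- the module-level dict `numbers`
def numbersDict : PySem.Dict Int Int :=
  PySem.Dict.mk [(0, 6), (1, 2), (2, 5), (3, 5), (4, 4), (5, 5), (6, 6), (7, 3), (8, 7), (9, 6)]

-- the inner `while` loop: scan digit downward; `none` = KeyError at digit = -1
-- (fuel 11 is enough: digit runs 9,8,…,0,-1 and the dict lookup fails at -1)
def scanDigit (k rem2 : Int) : Nat → Int → Option (Int × Int)
  | 0, _ => none
  | f + 1, dig =>
    match numbersDict.get? dig with
    | none => none
    | some c => if c ≤ k ∧ k - c ≥ rem2 then some (dig, c) else scanDigit k rem2 f (dig - 1)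

-- the `for i in range(n)` loop; state (k, result); `none` propagates the KeyError
def loopA (n : Int) : List Int → Int → List Char → Option (List Char)
  | [], _, res => some res
  | i :: rest, k, res =>
    match scanDigit k ((n - i - 1) * 2) 11 9 with
    | none => none
    | some (dig, c) => loopA n rest (k - c) (res ++ PySem.Int.toChars dig)

def create_max_number (n : Int) (k : Int) : String :=
  match loopA n (PySem.List.pyRange 0 n 1) k [] with
  | some res => String.ofList res
  | none => ""   -- unreachable under Pre_ (KeyError in Python)

-- ===== PORT B =====
def create_max_number_alt (n : Int) (k : Int) : String :=
  let a := k - 2 * (n - 1)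
  let nines := if a ≥ 6 then min n (PySem.Int.floordiv (a - 2) 4) else 0
  let a2 := a - 4 * nines
  let sevens := if a2 ≥ 3 then min (n - nines) (a2 - 2) else 0
  let ones := n - nines - sevens
  String.ofList (PySem.List.pyRepeat ['9'] nines ++ PySem.List.pyRepeat ['7'] sevens ++
             PySem.List.pyRepeat ['1'] ones)

-- ===== PRECONDITION & SPEC =====
-- Pre_ excludes exactly the infeasible inputs (n ≥ 1 with k < 2*n), on which A's
-- digit scan falls to -1 and raises KeyError.
def Pre_create_max_number (n : Int) (k : Int) : Prop := n ≤ 0 ∨ 2 * n ≤ k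
instance (n : Int) (k : Int) : Decidable (Pre_create_max_number n k) := by
  unfold Pre_create_max_number; infer_instance
def pvWitness_create_max_number : Int × Int := (3, 20)

def Spec_create_max_number (n : Int) (k : Int) (out : String) : Prop := out = create_max_number_alt n k
instance (n : Int) (k : Int) (out : String) : Decidable (Spec_create_max_number n k out) := by unfold Spec_create_max_number; infer_instance

-- ===== CLAIM (what is proved, stated in full; the proofs are below) =====
def Claim_equal_create_max_number : Prop := ∀ (n : Int) (k : Int), Dom_create_max_number n k → Pre_create_max_number n k → Spec_create_max_number n k (create_max_number n k)

-- ===== LEMMAS AND PROOFS =====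

-- proof-side recursive description of the greedy digit sequence: r positions left, budget k
def gsim : Nat → Int → List Char
  | 0, _ => []
  | r + 1, k =>
    if k - 2 * r ≥ 6 then '9' :: gsim r (k - 6)
    else if k - 2 * r ≥ 3 then '7' :: gsim r (k - 3)
    else '1' :: gsim r (k - 2)

lemma scanDigit_nine (k rem2 : Int) (h : 6 ≤ k ∧ k - 6 ≥ rem2) :
    scanDigit k rem2 11 9 = some (9, 6) := by
  simp [scanDigit, numbersDict, PySem.Dict.get?, h]

lemma scanDigit_seven (k rem2 : Int) (hn : ¬ (6 ≤ k ∧ k - 6 ≥ rem2)) (hs : ¬ (7 ≤ k ∧ k - 7 ≥ rem2))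
    (h : 3 ≤ k ∧ k - 3 ≥ rem2) : scanDigit k rem2 11 9 = some (7, 3) := by
  simp [scanDigit, numbersDict, PySem.Dict.get?, hn, hs, h]

lemma scanDigit_one (k rem2 : Int) (hk : k - rem2 < 3) (h : 2 ≤ k ∧ k - 2 ≥ rem2) :
    scanDigit k rem2 11 9 = some (1, 2) := by
  have h6 : ¬ (6 ≤ k ∧ k - 6 ≥ rem2) := by omega
  have h7 : ¬ (7 ≤ k ∧ k - 7 ≥ rem2) := by omega
  have h3 : ¬ (3 ≤ k ∧ k - 3 ≥ rem2) := by omega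
  have h5 : ¬ (5 ≤ k ∧ k - 5 ≥ rem2) := by omega
  have h4 : ¬ (4 ≤ k ∧ k - 4 ≥ rem2) := by omega
  simp [scanDigit, numbersDict, PySem.Dict.get?, h6, h7, h3, h5, h4, h]

lemma gsim_nine {r : Nat} {k : Int} (h : k - 2 * r ≥ 6) :
    gsim (r + 1) k = '9' :: gsim r (k - 6) := by simp [gsim, h]

lemma gsim_seven {r : Nat} {k : Int} (h9 : ¬ k - 2 * r ≥ 6) (h : k - 2 * r ≥ 3) :
    gsim (r + 1) k = '7' :: gsim r (k - 3) := by simp [gsim, h9, h]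

lemma gsim_one {r : Nat} {k : Int} (h9 : ¬ k - 2 * r ≥ 6) (h7 : ¬ k - 2 * r ≥ 3) :
    gsim (r + 1) k = '1' :: gsim r (k - 2) := by simp [gsim, h9, h7]

lemma loopA_eq (r : Nat) : ∀ (n k : Int) (res : List Char), 2 * (r : Int) ≤ k →
    loopA n (PySem.List.pyRange (n - r) n 1) k res = some (res ++ gsim r k) := by
  induction r with
  | zero =>
    intro n k res h
    rw [PySem.List.pyRange_one_eq_nil (by omega)]
    simp [loopA, gsim]
  | succ r ih =>
    intro n k res h
    rw [PySem.List.pyRange_one_cons (by push_cast; omega)]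
    simp only [loopA]
    rw [show (((r + 1 : Nat)) : Int) = (r : Int) + 1 by push_cast; ring]
    rw [show (n - (n - ((r : Int) + 1)) - 1) * 2 = 2 * (r : Int) by ring]
    rw [show n - ((r : Int) + 1) + 1 = n - (r : Int) by ring]
    have hr : 2 * ((r + 1 : Nat) : Int) ≤ k := h
    by_cases h9 : k - 2 * (r : Int) ≥ 6
    · rw [scanDigit_nine k (2 * r) ⟨by omega, by omega⟩, gsim_nine h9]
      dsimp only
      rw [show PySem.Int.toChars 9 = ['9'] by decide]
      rw [ih n (k - 6) (res ++ ['9']) (by push_cast at hr ⊢; omega)]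
      simp
    · by_cases h7 : k - 2 * (r : Int) ≥ 3
      · rw [scanDigit_seven k (2 * r) (by omega) (by omega) ⟨by omega, by omega⟩, gsim_seven h9 h7]
        dsimp only
        rw [show PySem.Int.toChars 7 = ['7'] by decide]
        rw [ih n (k - 3) (res ++ ['7']) (by omega)]
        simp
      · rw [scanDigit_one k (2 * r) (by omega) ⟨by push_cast at hr; omega, by push_cast at hr; omega⟩, gsim_one h9 h7]
        dsimp only
        rw [show PySem.Int.toChars 1 = ['1'] by decide]
        rw [ih n (k - 2) (res ++ ['1']) (by push_cast at hr; omega)]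
        simp

-- B's character list, named for the proofs (create_max_number_alt is definitionally ofList of it)
def altList (n k : Int) : List Char :=
  let a := k - 2 * (n - 1)
  let nines := if a ≥ 6 then min n (PySem.Int.floordiv (a - 2) 4) else 0
  let a2 := a - 4 * nines
  let sevens := if a2 ≥ 3 then min (n - nines) (a2 - 2) else 0
  let ones := n - nines - sevens
  PySem.List.pyRepeat ['9'] nines ++ PySem.List.pyRepeat ['7'] sevens ++
    PySem.List.pyRepeat ['1'] ones

lemma alt_def (n k : Int) : create_max_number_alt n k = String.ofList (altList n k) := rfl

lemma repeat_nil (c : Char) (x : Int) (h : x ≤ 0) : PySem.List.pyRepeat [c] x = [] := by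
  rw [PySem.List.pyRepeat_singleton]
  have : x.toNat = 0 := by omega
  rw [this, List.replicate_zero]

lemma repeat_cons (c : Char) (x : Int) (h : 0 ≤ x) :
    PySem.List.pyRepeat [c] (x + 1) = c :: PySem.List.pyRepeat [c] x := by
  rw [PySem.List.pyRepeat_singleton, PySem.List.pyRepeat_singleton]
  have : (x + 1).toNat = x.toNat + 1 := by omega
  rw [this, List.replicate_succ]

lemma altList_zero (k : Int) (hk : 0 ≤ k) : altList 0 k = [] := by
  unfold altList
  dsimp only
  rw [PySem.Int.floordiv_eq_ediv_of_pos (by norm_num)]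
  split_ifs <;>
    rw [repeat_nil _ _ (by omega), repeat_nil _ _ (by omega), repeat_nil _ _ (by omega)] <;> rfl

lemma altList_succ (r : Nat) (k : Int) (hk : 2 * ((r : Int) + 1) ≤ k) :
    altList ((r : Int) + 1) k =
      (if k - 2 * r ≥ 6 then '9' :: altList r (k - 6)
       else if k - 2 * r ≥ 3 then '7' :: altList r (k - 3)
       else '1' :: altList r (k - 2)) := by
  unfold altList
  dsimp only
  simp only [PySem.Int.floordiv_eq_ediv_of_pos (by norm_num : (0:Int) < 4)]
  rw [show k - 2 * (((r : Int) + 1) - 1) = k - 2 * r from by ring,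
      show k - 6 - 2 * ((r : Int) - 1) = k - 2 * r - 4 from by ring,
      show k - 3 - 2 * ((r : Int) - 1) = k - 2 * r - 1 from by ring,
      show k - 2 - 2 * ((r : Int) - 1) = k - 2 * r + 0 from by ring]
  set a := k - 2 * (r : Int) with hadef
  have har : 2 * ((r : Int) + 1) ≤ k := hk
  by_cases h6 : a ≥ 6
  · simp only [if_pos h6]
    set N : Int := if a - 4 ≥ 6 then min (↑r : Int) ((a - 4 - 2) / 4) else 0 with hNdef
    have hN0 : 0 ≤ N := by rw [hNdef]; split_ifs <;> omega
    have hN : min ((↑r : Int) + 1) ((a - 2) / 4) = N + 1 := by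
      rw [hNdef]; split_ifs <;> omega
    rw [hN]
    have hS : (if a - 4 * (N + 1) ≥ 3 then min ((↑r : Int) + 1 - (N + 1)) (a - 4 * (N + 1) - 2) else 0)
        = (if a - 4 - 4 * N ≥ 3 then min ((↑r : Int) - N) (a - 4 - 4 * N - 2) else 0) := by
      by_cases hc : a - 4 - 4 * N ≥ 3
      · rw [if_pos (by omega), if_pos hc]; omega
      · rw [if_neg (by omega), if_neg hc]
    rw [hS]
    rw [repeat_cons _ _ hN0]
    set S : Int := if a - 4 - 4 * N ≥ 3 then min ((↑r : Int) - N) (a - 4 - 4 * N - 2) else 0 with hSdef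
    rw [show (↑r : Int) + 1 - (N + 1) - S = ↑r - N - S from by ring]
    simp
  · rw [if_neg h6, if_neg h6]
    by_cases h3 : a ≥ 3
    · rw [if_pos h3]
      rw [if_neg (show ¬ a - 1 ≥ 6 from by omega)]
      have hc1 : a - 4 * (0 : Int) ≥ 3 := by omega
      rw [if_pos hc1]
      set S : Int := if a - 1 - 4 * (0 : Int) ≥ 3 then min ((↑r : Int) - 0) (a - 1 - 4 * 0 - 2) else 0 with hSdef
      have hS0 : 0 ≤ S := by rw [hSdef]; split_ifs <;> omega
      have hS : min ((↑r : Int) + 1 - 0) (a - 4 * 0 - 2) = S + 1 := by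
        rw [hSdef]; split_ifs <;> omega
      rw [hS, repeat_cons _ _ hS0]
      rw [show (↑r : Int) + 1 - 0 - (S + 1) = ↑r - 0 - S from by ring]
      simp
    · rw [if_neg h3]
      rw [if_neg (show ¬ a + 0 ≥ 6 from by omega)]
      rw [if_neg (show ¬ a + 0 - 4 * (0 : Int) ≥ 3 from by omega)]
      rw [if_neg (show ¬ a - 4 * (0 : Int) ≥ 3 from by omega)]
      rw [show (↑r : Int) + 1 - 0 - 0 = (↑r - 0 - 0) + 1 from by ring]
      rw [repeat_cons _ _ (by omega)]
      simp

lemma altList_nonpos (n k : Int) (hn : n ≤ 0) : altList n k = [] := by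
  unfold altList
  dsimp only
  simp only [PySem.Int.floordiv_eq_ediv_of_pos (by norm_num : (0:Int) < 4)]
  split_ifs <;>
    rw [repeat_nil _ _ (by omega), repeat_nil _ _ (by omega), repeat_nil _ _ (by omega)] <;> rfl

lemma alt_eq_gsim (r : Nat) : ∀ (k : Int), 2 * (r : Int) ≤ k → altList r k = gsim r k := by
  induction r with
  | zero =>
    intro k hk
    rw [Nat.cast_zero, altList_zero k (by omega)]
    rfl
  | succ r ih =>
    intro k hk
    rw [show ((r + 1 : Nat) : Int) = (r : Int) + 1 from by push_cast; ring]
    rw [altList_succ r k (by push_cast at hk; omega)]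
    by_cases h6 : k - 2 * (r : Int) ≥ 6
    · rw [if_pos h6, gsim_nine h6, ih (k - 6) (by omega)]
    · rw [if_neg h6]
      by_cases h3 : k - 2 * (r : Int) ≥ 3
      · rw [if_pos h3, gsim_seven h6 h3, ih (k - 3) (by omega)]
      · rw [if_neg h3, gsim_one h6 h3, ih (k - 2) (by push_cast at hk; omega)]

-- ===== VERDICT (by name: the statement is the Claim_ definition above) =====
theorem create_max_number_spec : Claim_equal_create_max_number := by
  unfold Claim_equal_create_max_number
  intro n k _ hpre
  unfold Spec_create_max_number
  unfold Pre_create_max_number at hpre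
  by_cases hn : n ≤ 0
  · unfold create_max_number
    rw [PySem.List.pyRange_one_eq_nil (by omega)]
    rw [alt_def, altList_nonpos n k hn]
    rfl
  · have h2 : 2 * n ≤ k := by omega
    unfold create_max_number
    rw [show (0 : Int) = n - (n.toNat : Int) from by omega]
    rw [loopA_eq n.toNat n k [] (by omega)]
    dsimp only
    rw [alt_def]
    rw [show n = ((n.toNat : Nat) : Int) from by omega]
    rw [alt_eq_gsim n.toNat k (by omega)]
    simp
    rw [show (max n 0).toNat = n.toNat from by omega]
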